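-- pv_equiv track=rewrite | github.com/pattenmlane/inconspicuousname | manual_traders/R4/r4_counterparty_phase1/r4_phase2_analysis.py | burst_near
-- ===== SOURCE A (Python) =====
-- from collections import defaultdict
--
-- W_BURST = 500
--
-- def burst_near(burst_exact: set[tuple[int, int]]) -> set[tuple[int, int]]:
--     by_day: dict[int, list[int]] = defaultdict(list)
--     for d, ts in burst_exact:
--         by_day[d].append(ts)
--     near = set(burst_exact)
--     for d, ts in burst_exact:
--         for ots in by_day[d]:
--             if abs(ots - ts) <= W_BURST:
--                 near.add((d, ots))
--     return near
-- ===== SOURCE B (Python) =====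
-- def burst_near(burst_exact: set[tuple[int, int]]) -> set[tuple[int, int]]:
--     # Every pair the window loop could add is already in burst_exact,
--     # so the result is just a fresh copy of the input set.
--     return set(burst_exact)
-- ===== Notes on version B (the rewrite author's own statement) =====
-- stated objective: simpler
-- what changed: Dropped the per-day grouping and nested window scan (which can only re-add pairs already present) and return a fresh copy of the input set directly.
import Mathlib
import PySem

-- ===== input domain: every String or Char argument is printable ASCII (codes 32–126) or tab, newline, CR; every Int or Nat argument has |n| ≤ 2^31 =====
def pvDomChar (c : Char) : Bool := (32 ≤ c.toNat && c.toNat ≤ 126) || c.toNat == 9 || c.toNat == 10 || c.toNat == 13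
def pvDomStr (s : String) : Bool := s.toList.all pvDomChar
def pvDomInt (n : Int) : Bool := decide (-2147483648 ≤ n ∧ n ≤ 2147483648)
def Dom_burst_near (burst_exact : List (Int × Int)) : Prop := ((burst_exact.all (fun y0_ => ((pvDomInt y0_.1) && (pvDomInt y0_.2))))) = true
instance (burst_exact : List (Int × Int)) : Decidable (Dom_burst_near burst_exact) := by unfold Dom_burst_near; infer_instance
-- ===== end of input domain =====

-- B drops the per-day grouping and nested window scan of A (which can only
-- re-add pairs already present) and returns a fresh copy of the input set.


-- ===== PORT A =====
-- W_BURST = 500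
def W_BURST : Int := 500

-- literal transliteration of A: group timestamps by day into a defaultdict(list),
-- start from set(burst_exact), then the nested window loop adding (d, ots).
def burst_near (burst_exact : List (Int × Int)) : List (Int × Int) :=
  let by_day : PySem.Dict Int (List Int) :=
    burst_exact.foldl (fun d p => d.modify p.1 [] (· ++ [p.2])) PySem.Dict.empty
  let near : PySem.Set (Int × Int) := PySem.Set.ofList burst_exact
  burst_exact.foldl (fun near p =>
    (by_day.getD p.1 []).foldl (fun near ots =>
      if |ots - p.2| ≤ W_BURST then PySem.Set.add near (p.1, ots) else near) near) near

-- ===== PORT B =====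
def burst_near_alt (burst_exact : List (Int × Int)) : List (Int × Int) :=
  PySem.Set.ofList burst_exact

-- ===== PRECONDITION & SPEC =====
def Spec_burst_near (burst_exact : List (Int × Int)) (out : List (Int × Int)) : Prop := out = burst_near_alt burst_exact
instance (burst_exact : List (Int × Int)) (out : List (Int × Int)) : Decidable (Spec_burst_near burst_exact out) := by unfold Spec_burst_near; infer_instance

-- ===== CLAIM (what is proved, stated in full; the proofs are below) =====
def Claim_equal_burst_near : Prop := ∀ (burst_exact : List (Int × Int)), Dom_burst_near burst_exact → Spec_burst_near burst_exact (burst_near burst_exact)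

-- ===== LEMMAS AND PROOFS =====

-- the inner loop only adds pairs already in the accumulator, so it is the identity
lemma inner_foldl_id (l : List Int) (c t : Int) (s : PySem.Set (Int × Int))
    (h : ∀ o ∈ l, (c, o) ∈ s) :
    l.foldl (fun near ots =>
      if |ots - t| ≤ W_BURST then PySem.Set.add near (c, ots) else near) s = s := by
  induction l with
  | nil => rfl
  | cons x xs ih =>
    simp only [List.foldl_cons]
    split_ifs with hw
    · rw [PySem.Set.add_of_mem (h x (List.mem_cons_self))]
      exact ih (fun o ho => h o (List.mem_cons_of_mem _ ho))
    · exact ih (fun o ho => h o (List.mem_cons_of_mem _ ho))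

-- the outer loop is the identity whenever every pair it could add is already in s
lemma outer_foldl_id (l : List (Int × Int)) (by_day : PySem.Dict Int (List Int))
    (s : PySem.Set (Int × Int))
    (h : ∀ p ∈ l, ∀ o ∈ by_day.getD p.1 [], (p.1, o) ∈ s) :
    l.foldl (fun near p =>
      (by_day.getD p.1 []).foldl (fun near ots =>
        if |ots - p.2| ≤ W_BURST then PySem.Set.add near (p.1, ots) else near) near) s = s := by
  induction l with
  | nil => rfl
  | cons x xs ih =>
    simp only [List.foldl_cons]
    rw [inner_foldl_id _ _ _ _ (h x (List.mem_cons_self))]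
    exact ih (fun p hp => h p (List.mem_cons_of_mem _ hp))

-- every timestamp grouped under day c came from a pair (c, o) of the input
lemma mem_by_day (burst_exact : List (Int × Int)) (c o : Int)
    (ho : o ∈ (burst_exact.foldl (fun d p => d.modify p.1 [] (· ++ [p.2]))
                PySem.Dict.empty).getD c []) :
    (c, o) ∈ burst_exact := by
  rw [PySem.Dict.getD_foldl_modify_append] at ho
  simp only [PySem.Dict.getD_empty, List.nil_append, List.mem_map, List.mem_filter] at ho
  obtain ⟨q, ⟨hq, hq1⟩, hq2⟩ := ho
  have : q = (c, o) := by
    cases q; simp_all [beq_iff_eq]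
  exact this ▸ hq

-- ===== VERDICT (by name: the statement is the Claim_ definition above) =====
theorem burst_near_spec : Claim_equal_burst_near := by
  intro burst_exact _
  unfold Spec_burst_near burst_near burst_near_alt
  apply outer_foldl_id
  intro p _ o ho
  exact (PySem.Set.mem_ofList _ _).mpr (mem_by_day burst_exact p.1 o ho)
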